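-- pv_equiv track=rewrite | github.com/joechea-aupp/homework_8_collab | exercise-3.py | remove_all_after
-- ===== SOURCE A (Python) =====
-- def remove_all_after(numbers, n):
--     result = []
--     #check if the list is empty or the n element cant be found, return the list back
--     if len(numbers) == 0 or n not in numbers:
--         return numbers
--
--     for num in numbers:
--         if num != n:
--             result.append(num)
--         else:
--             #if the cutting element is found, add it to the result and break the loop
--             result.append(num)
--             break
--
--     return result
-- ===== SOURCE B (Python) =====
-- def remove_all_after(numbers, n):
--     if n not in numbers:
--         return numbers
--     return numbers[:numbers.index(n) + 1]
-- ===== Notes on version B (the rewrite author's own statement) =====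
-- stated objective: simpler
-- what changed: Replaces the element-by-element append loop with a membership guard plus index-and-slice: the prefix through the first occurrence is produced by one slice instead of building a result list in a loop.
import Mathlib
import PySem

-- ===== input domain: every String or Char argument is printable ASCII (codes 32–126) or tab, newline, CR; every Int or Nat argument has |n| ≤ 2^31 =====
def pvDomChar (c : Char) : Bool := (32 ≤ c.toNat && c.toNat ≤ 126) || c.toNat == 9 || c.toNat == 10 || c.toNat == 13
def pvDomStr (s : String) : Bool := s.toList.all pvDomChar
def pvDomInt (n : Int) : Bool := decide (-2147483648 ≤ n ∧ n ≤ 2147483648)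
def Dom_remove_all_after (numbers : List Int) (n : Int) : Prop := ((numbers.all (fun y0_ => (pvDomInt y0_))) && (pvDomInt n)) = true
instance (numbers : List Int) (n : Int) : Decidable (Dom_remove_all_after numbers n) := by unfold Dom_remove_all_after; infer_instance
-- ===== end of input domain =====

-- B replaces A's append loop with a membership guard plus index-and-slice (simpler decomposition).

-- ===== PORT A =====
-- the for-loop of A: appends each num to result, stopping (inclusive) at the first num == n
def removeAllAfterLoopA (l : List Int) (n : Int) (result : List Int) : List Int :=
  match l with
  | [] => result
  | num :: rest =>
      if num ≠ n then removeAllAfterLoopA rest n (result ++ [num])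
      else result ++ [num]

def remove_all_after (numbers : List Int) (n : Int) : List Int :=
  if numbers.length = 0 ∨ ¬ numbers.contains n then numbers
  else removeAllAfterLoopA numbers n []

-- ===== PORT B =====
def remove_all_after_alt (numbers : List Int) (n : Int) : List Int :=
  if ¬ numbers.contains n then numbers
  else
    match PySem.List.index? numbers n with
    | some i => PySem.List.slice numbers none (some ((i : Int) + 1))
    | none => numbers   -- unreachable: n ∈ numbers

-- ===== PRECONDITION & SPEC =====
def Spec_remove_all_after (numbers : List Int) (n : Int) (out : List Int) : Prop := out = remove_all_after_alt numbers n
instance (numbers : List Int) (n : Int) (out : List Int) : Decidable (Spec_remove_all_after numbers n out) := by unfold Spec_remove_all_after; infer_instance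

-- ===== CLAIM (what is proved, stated in full; the proofs are below) =====
def Claim_equal_remove_all_after : Prop := ∀ (numbers : List Int) (n : Int), Dom_remove_all_after numbers n → Spec_remove_all_after numbers n (remove_all_after numbers n)

-- ===== LEMMAS AND PROOFS =====

-- A's loop yields the accumulator followed by the prefix through the first occurrence of n
-- (or all of l when n does not occur).
lemma removeAllAfterLoopA_eq (n : Int) (l acc : List Int) :
    removeAllAfterLoopA l n acc =
      acc ++ (match PySem.List.index? l n with
              | some i => l.take (i + 1)
              | none => l) := by
  induction l generalizing acc with
  | nil => simp only [removeAllAfterLoopA, PySem.List.index?, List.idxOf?_nil]; simp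
  | cons x xs ih =>
      by_cases hx : x = n
      · subst hx
        rw [PySem.List.index?_cons_self]
        simp [removeAllAfterLoopA]
      · rw [removeAllAfterLoopA, if_pos hx, ih, PySem.List.index?_cons_of_ne xs hx]
        cases h : PySem.List.index? xs n with
        | none => simp
        | some i => simp [List.take_succ_cons]

theorem remove_all_after_spec : Claim_equal_remove_all_after := by
  intro numbers n _
  unfold Spec_remove_all_after remove_all_after remove_all_after_alt
  by_cases hmem : n ∈ numbers
  · have hc : numbers.contains n = true := by simpa using hmem
    have hne : numbers.length ≠ 0 := by
      intro h0
      rw [List.length_eq_zero_iff] at h0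
      subst h0; simp at hmem
    rw [if_neg (by simp [hmem, hne]), if_neg (by simp [hmem])]
    obtain ⟨i, hi⟩ := Option.isSome_iff_exists.mp
      ((PySem.List.index?_isSome_iff numbers n).mpr hmem)
    rw [removeAllAfterLoopA_eq, hi]
    have h1 : ((i : Int) + 1) = ((i + 1 : Nat) : Int) := by push_cast; ring
    show [] ++ numbers.take (i + 1) = PySem.List.slice numbers none (some ((i : Int) + 1))
    rw [h1, PySem.List.slice_to_natCast, List.nil_append]
  · rw [if_pos (Or.inr (by simp [hmem])), if_pos (by simp [hmem])]
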